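-- pv_equiv track=rewrite | github.com/Bakaryndi94/crc32-collision-bruteforce | exo 3.py | incrementer
-- ===== SOURCE A (Python) =====
-- def incrementer(chaine, alphabet):
--     if chaine == "":  #si la chaine est vide on prend le premier élement de combinaison
--         return alphabet[0]
--     dernier = chaine[-1] #on prend le dernier caractère du mot entré en paramètre
--     position = alphabet.index(dernier) # on prend l'indice de l'element dans la variable dernier
--     if position + 1 < len(alphabet):
--         return chaine[:-1] + alphabet[position + 1] # on prend tout les éléments de la chaine sauf le dernier et on rajoute celui qui suit le dernier
--     return incrementer(chaine[:-1], alphabet) + alphabet[0] #on prend tout les élements sauf le dernier et on ajoute le premier de la chaine donne en paramètre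
-- ===== SOURCE B (Python) =====
-- def incrementer(chaine, alphabet):
--     if chaine == "":
--         return alphabet[0]
--     result = list(chaine)
--     for i in range(len(result) - 1, -1, -1):
--         pos = alphabet.index(result[i])
--         if pos + 1 < len(alphabet):
--             result[i] = alphabet[pos + 1]
--             return "".join(result)
--         result[i] = alphabet[0]
--     return alphabet[0] + "".join(result)
-- ===== Notes on version B (the rewrite author's own statement) =====
-- stated objective: alternative
-- what changed: Replaces A's recursion on chaine[:-1] (carry held on the call stack, result rebuilt by string concatenation on the way back) with an explicit right-to-left index loop over a mutable char list that writes the carry in place and joins once.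
import Mathlib
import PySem

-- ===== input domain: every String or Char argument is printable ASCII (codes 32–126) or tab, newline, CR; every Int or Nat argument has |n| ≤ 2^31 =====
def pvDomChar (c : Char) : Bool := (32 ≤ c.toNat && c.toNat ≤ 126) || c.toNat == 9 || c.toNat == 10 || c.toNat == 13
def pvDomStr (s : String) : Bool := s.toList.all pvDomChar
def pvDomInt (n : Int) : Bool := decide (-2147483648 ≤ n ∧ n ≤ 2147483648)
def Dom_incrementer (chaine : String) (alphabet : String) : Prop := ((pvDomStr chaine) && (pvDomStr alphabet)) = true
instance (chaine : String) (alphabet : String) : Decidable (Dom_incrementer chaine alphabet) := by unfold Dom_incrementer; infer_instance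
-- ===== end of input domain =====

-- B replaces A's right-recursion (call-stack carry) by an explicit index loop scanning
-- right-to-left over a char list (loop-index carry); same cost, different decomposition.

-- ===== PORT A =====
-- A raises (IndexError/ValueError) on some inputs; the helper returns none exactly there,
-- and Pre_incrementer excludes those inputs.
def incAux (cs : List Char) (al : List Char) : Option (List Char) :=
  if _h : cs = [] then al.head?.map (fun c => [c])
  else
    match PySem.List.index? al (PySem.List.pyGetD cs (-1) ' ') with  -- dernier = chaine[-1]
    | none => none
    | some position =>
      if position + 1 < al.length then
        some (cs.dropLast ++ [al.getD (position + 1) ' '])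
      else
        (incAux cs.dropLast al).map (fun r => r ++ al.take 1)
termination_by cs.length
decreasing_by
  have := List.length_pos_iff.mpr _h
  simp [List.length_dropLast]; omega

def incrementer (chaine : String) (alphabet : String) : String :=
  String.mk ((incAux chaine.toList alphabet.toList).getD [])

-- ===== PORT B =====
-- the for-loop of Source B: i counts down; none = the ValueError of alphabet.index
def altLoop (res : List Char) (al : List Char) (i : Nat) : Option (List Char) :=
  match PySem.List.index? al (res.getD i ' ') with
  | none => none
  | some pos =>
    if pos + 1 < al.length then
      some (res.set i (al.getD (pos + 1) ' '))
    else
      match i with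
      | 0 => some (al.take 1 ++ res.set i (al.getD 0 ' '))
      | j + 1 => altLoop (res.set i (al.getD 0 ' ')) al j
termination_by i

def incrementer_alt (chaine : String) (alphabet : String) : String :=
  if chaine = "" then String.mk (alphabet.toList.take 1)
  else String.mk ((altLoop chaine.toList alphabet.toList (chaine.toList.length - 1)).getD [])

-- ===== PRECONDITION & SPEC =====
-- Pre_: alphabet nonempty, and after stripping the trailing run of characters whose first
-- occurrence in alphabet is its last position (the "carry" characters), the next character
-- to the left, if any, is in the alphabet; elsewhere Python A raises IndexError/ValueError.
def ovChar (al : List Char) (c : Char) : Bool :=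
  PySem.List.index? al c == some (al.length - 1)

def Pre_incrementer (chaine : String) (alphabet : String) : Prop :=
  alphabet ≠ "" ∧
  (chaine.toList.reverse.dropWhile (ovChar alphabet.toList) = [] ∨
   (chaine.toList.reverse.dropWhile (ovChar alphabet.toList)).headD ' ' ∈ alphabet.toList)
instance (chaine : String) (alphabet : String) : Decidable (Pre_incrementer chaine alphabet) := by
  unfold Pre_incrementer; infer_instance

def pvWitness_incrementer : String × String := ("ab", "abc")

def Spec_incrementer (chaine : String) (alphabet : String) (out : String) : Prop := out = incrementer_alt chaine alphabet
instance (chaine : String) (alphabet : String) (out : String) : Decidable (Spec_incrementer chaine alphabet out) := by unfold Spec_incrementer; infer_instance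

-- ===== CLAIM (what is proved, stated in full; the proofs are below) =====
def Claim_equal_incrementer : Prop := ∀ (chaine : String) (alphabet : String), Dom_incrementer chaine alphabet → Pre_incrementer chaine alphabet → Spec_incrementer chaine alphabet (incrementer chaine alphabet)

-- ===== LEMMAS AND PROOFS =====

lemma getD_append_len (xs ys : List Char) : (xs ++ ys).getD xs.length ' ' = ys.headD ' ' := by
  induction xs with
  | nil => cases ys <;> simp [List.getD]
  | cons x t ih => simpa [List.getD] using ih

lemma set_append_len (xs ys : List Char) (c : Char) :
    (xs ++ ys).set xs.length c = xs ++ ys.set 0 c := by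
  induction xs with
  | nil => simp
  | cons x t ih => simp [ih]

-- the loop of B, started at the last index of (l ++ [a]), computes exactly what A's
-- recursion computes on (l ++ [a]), with any all-carry suffix already materialised
lemma altLoop_eq_incAux (al : List Char) (l : List Char) :
    ∀ (a : Char) (suffix : List Char),
      altLoop (l ++ [a] ++ suffix) al l.length = (incAux (l ++ [a]) al).map (· ++ suffix) := by
  induction l using List.reverseRecOn with
  | nil =>
      intro a suffix
      simp only [List.nil_append, List.length_nil]
      rw [altLoop.eq_def, incAux, dif_neg (by simp : ¬([a] : List Char) = [])]
      have hd : PySem.List.pyGetD [a] (-1) ' ' = a := by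
        simpa using PySem.List.pyGetD_neg_one_append_singleton [] a ' '
      have hg : ([a] ++ suffix).getD 0 ' ' = a := rfl
      rw [hd, hg]
      cases h : PySem.List.index? al a with
      | none => simp
      | some pos =>
        have hal : al ≠ [] := by
          intro he; subst he; simp [PySem.List.index?] at h
        simp only [Option.map_some]
        split_ifs with hlt
        · simp
        · rw [incAux]
          cases al with
          | nil => exact absurd rfl hal
          | cons a0 t => simp
  | append_singleton l' a' ih =>
      intro a suffix
      rw [altLoop.eq_def, incAux, dif_neg (by simp)]
      rw [PySem.List.pyGetD_neg_one_append_singleton (l' ++ [a']) a ' ']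
      have hget : ((l' ++ [a'] ++ [a]) ++ suffix).getD (l' ++ [a']).length ' ' = a := by
        rw [List.append_assoc (l' ++ [a']), getD_append_len]; rfl
      have hlen : (l' ++ [a']).length = l'.length + 1 := by simp
      rw [hget]
      cases h : PySem.List.index? al a with
      | none => simp
      | some pos =>
        have hal : al ≠ [] := by
          intro he; subst he; simp [PySem.List.index?] at h
        have htake : al.take 1 = [al.getD 0 ' '] := by
          cases al with
          | nil => exact absurd rfl hal
          | cons a0 t => simp [List.getD]
        have hset : ∀ c : Char,
            ((l' ++ [a'] ++ [a]) ++ suffix).set (l'.length + 1) c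
              = l' ++ [a'] ++ (c :: suffix) := by
          intro c
          rw [← hlen, List.append_assoc (l' ++ [a']), set_append_len]
          simp
        simp only [hlen]
        split_ifs with hlt
        · rw [hset]
          simp
        · rw [hset]
          have := ih a' ((al.getD 0 ' ') :: suffix)
          rw [this]
          simp only [List.dropLast_concat]
          cases incAux (l' ++ [a']) al with
          | none => simp
          | some r => simp [htake]

-- ===== VERDICT (by name: the statement is the Claim_ definition above) =====
theorem incrementer_spec : Claim_equal_incrementer := by
  intro chaine alphabet _ hpre
  unfold Spec_incrementer incrementer incrementer_alt
  by_cases hch : chaine = ""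
  · subst hch
    rw [if_pos rfl, incAux]
    cases alphabet.toList with
    | nil => simp
    | cons a0 t => simp
  · rw [if_neg hch]
    have hne : chaine.toList ≠ [] := fun h => hch (String.toList_eq_nil_iff.mp h)
    obtain ⟨l, a, hla⟩ := List.eq_nil_or_concat chaine.toList |>.resolve_left hne
    rw [List.concat_eq_append] at hla
    rw [hla]
    have hlen : (l ++ [a]).length - 1 = l.length := by simp
    rw [hlen]
    have := altLoop_eq_incAux alphabet.toList l a []
    rw [List.append_nil] at this
    rw [this]
    cases incAux (l ++ [a]) alphabet.toList with
    | none => simp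
    | some r => simp
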